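-- pv_equiv track=rewrite | github.com/stefanpie/digital-design-dataset | digital_design_dataset/flows/clock_detect.py | filter_clock_candidate_semanitcly
-- ===== SOURCE A (Python) =====
-- def filter_clock_candidate_semanitcly(candidate: str) -> bool:
--     if candidate.lower().startswith(("rst_", "reset_")):
--         return False
--     if candidate.lower().endswith(("_rst", "_reset")):
--         return False
--     if candidate.lower() in {"rst", "reset"}:
--         return False
--     for keyword in ("_rst_", "_reset_"):
--         if keyword in candidate.lower():
--             return False
--
--     if candidate.lower().startswith(("en_", "enable_")):
--         return False
--     if candidate.lower().endswith(("_en", "_enable")):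
--         return False
--     if candidate.lower() in {"en", "enable"}:
--         return False
--     for keyword in ("_en_", "_enable_"):
--         if keyword in candidate.lower():
--             return False
--
--     # do the same with "ready", "valid"
--     if candidate.lower().startswith(("rdy_", "ready_")):
--         return False
--     if candidate.lower().endswith(("_rdy", "_ready")):
--         return False
--     if candidate.lower() in {"rdy", "ready"}:
--         return False
--     for keyword in ("_rdy_", "_ready_"):
--         if keyword in candidate.lower():
--             return False
--
--     if candidate.lower().startswith(("vld_", "valid_")):
--         return False
--     if candidate.lower().endswith(("_vld", "_valid")):
--         return False
--     if candidate.lower() in {"vld", "valid"}: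
--         return False
--     for keyword in ("_vld_", "_valid_"):
--         if keyword in candidate.lower():
--             return False
--
--     return True
-- ===== SOURCE B (Python) =====
-- def filter_clock_candidate_semanitcly(candidate: str) -> bool:
--     reject = {"rst", "reset", "en", "enable", "rdy", "ready", "vld", "valid"}
--     tok = ""
--     for ch in candidate.lower():
--         if ch == "_":
--             if tok in reject:
--                 return False
--             tok = ""
--         else:
--             tok += ch
--     return tok not in reject
-- ===== Notes on version B (the rewrite author's own statement) =====
-- stated objective: simpler
-- what changed: A's four copy-pasted blocks of startswith/endswith/exact-match/substring checks (8 keywords x 4 string scans over repeated lower() calls) are replaced by one left-to-right pass that lowercases once and tokenizes on underscores, rejecting as soon as a completed token is in the keyword set.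
import Mathlib
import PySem

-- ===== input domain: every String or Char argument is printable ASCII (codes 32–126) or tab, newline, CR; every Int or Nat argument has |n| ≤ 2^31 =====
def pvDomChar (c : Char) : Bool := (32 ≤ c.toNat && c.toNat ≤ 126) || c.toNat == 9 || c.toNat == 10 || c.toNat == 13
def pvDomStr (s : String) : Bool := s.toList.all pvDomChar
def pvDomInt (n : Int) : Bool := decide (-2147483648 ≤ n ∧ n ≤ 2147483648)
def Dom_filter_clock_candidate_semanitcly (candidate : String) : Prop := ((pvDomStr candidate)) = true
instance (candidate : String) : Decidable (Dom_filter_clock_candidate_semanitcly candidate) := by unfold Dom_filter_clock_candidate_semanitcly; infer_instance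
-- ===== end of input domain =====

set_option maxHeartbeats 1600000

-- B replaces A's four repeated startswith/endswith/exact/substring blocks by a single
-- left-to-right tokenizer on underscores that rejects as soon as a token is a reset/enable/ready/valid
-- keyword (objective: simpler — one pass, one keyword set).


-- ===== PORT A =====
def filter_clock_candidate_semanitcly (candidate : String) : Bool :=
  if PySem.Str.startswith (PySem.Str.lower candidate) "rst_" || PySem.Str.startswith (PySem.Str.lower candidate) "reset_" then false
  else if PySem.Str.endswith (PySem.Str.lower candidate) "_rst" || PySem.Str.endswith (PySem.Str.lower candidate) "_reset" then false
  else if PySem.Str.lower candidate == "rst" || PySem.Str.lower candidate == "reset" then false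
  else if PySem.Str.isIn "_rst_" (PySem.Str.lower candidate) || PySem.Str.isIn "_reset_" (PySem.Str.lower candidate) then false
  else if PySem.Str.startswith (PySem.Str.lower candidate) "en_" || PySem.Str.startswith (PySem.Str.lower candidate) "enable_" then false
  else if PySem.Str.endswith (PySem.Str.lower candidate) "_en" || PySem.Str.endswith (PySem.Str.lower candidate) "_enable" then false
  else if PySem.Str.lower candidate == "en" || PySem.Str.lower candidate == "enable" then false
  else if PySem.Str.isIn "_en_" (PySem.Str.lower candidate) || PySem.Str.isIn "_enable_" (PySem.Str.lower candidate) then false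
  else if PySem.Str.startswith (PySem.Str.lower candidate) "rdy_" || PySem.Str.startswith (PySem.Str.lower candidate) "ready_" then false
  else if PySem.Str.endswith (PySem.Str.lower candidate) "_rdy" || PySem.Str.endswith (PySem.Str.lower candidate) "_ready" then false
  else if PySem.Str.lower candidate == "rdy" || PySem.Str.lower candidate == "ready" then false
  else if PySem.Str.isIn "_rdy_" (PySem.Str.lower candidate) || PySem.Str.isIn "_ready_" (PySem.Str.lower candidate) then false
  else if PySem.Str.startswith (PySem.Str.lower candidate) "vld_" || PySem.Str.startswith (PySem.Str.lower candidate) "valid_" then false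
  else if PySem.Str.endswith (PySem.Str.lower candidate) "_vld" || PySem.Str.endswith (PySem.Str.lower candidate) "_valid" then false
  else if PySem.Str.lower candidate == "vld" || PySem.Str.lower candidate == "valid" then false
  else if PySem.Str.isIn "_vld_" (PySem.Str.lower candidate) || PySem.Str.isIn "_valid_" (PySem.Str.lower candidate) then false
  else true

-- ===== PORT B =====
-- the reject set of Source B, as lowered token character lists
def pvReject : List (List Char) :=
  [['r','s','t'], ['r','e','s','e','t'], ['e','n'], ['e','n','a','b','l','e'],
   ['r','d','y'], ['r','e','a','d','y'], ['v','l','d'], ['v','a','l','i','d']]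

-- Source B's loop over the lowered characters, carrying the current token `tok`
def pvAltGo (tok : List Char) : List Char → Bool
  | [] => !pvReject.contains tok
  | c :: rest =>
      if c = '_' then (if pvReject.contains tok then false else pvAltGo [] rest)
      else pvAltGo (tok ++ [c]) rest

def filter_clock_candidate_semanitcly_alt (candidate : String) : Bool :=
  pvAltGo [] (PySem.Str.lower candidate).toList

-- ===== PRECONDITION & SPEC =====
def Spec_filter_clock_candidate_semanitcly (candidate : String) (out : Bool) : Prop := out = filter_clock_candidate_semanitcly_alt candidate
instance (candidate : String) (out : Bool) : Decidable (Spec_filter_clock_candidate_semanitcly candidate out) := by unfold Spec_filter_clock_candidate_semanitcly; infer_instance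

-- ===== CLAIM (what is proved, stated in full; the proofs are below) =====
def Claim_equal_filter_clock_candidate_semanitcly : Prop := ∀ (candidate : String), Dom_filter_clock_candidate_semanitcly candidate → Spec_filter_clock_candidate_semanitcly candidate (filter_clock_candidate_semanitcly candidate)

-- ===== LEMMAS AND PROOFS =====

-- the token list B implicitly scans: tokens of `l` split on '_', the first one prefixed by `tok`
def pvToksFrom (tok : List Char) : List Char → List (List Char)
  | [] => [tok]
  | c :: rest => if c = '_' then tok :: pvToksFrom [] rest else pvToksFrom (tok ++ [c]) rest

theorem pvAltGo_eq_any (l : List Char) : ∀ tok,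
    pvAltGo tok l = !((pvToksFrom tok l).any (pvReject.contains ·)) := by
  induction l with
  | nil => intro tok; simp [pvAltGo, pvToksFrom]
  | cons c rest ih =>
      intro tok
      by_cases hc : c = '_'
      · by_cases hm : tok ∈ pvReject
        · simp [pvAltGo, pvToksFrom, hc, hm]
        · simp [pvAltGo, pvToksFrom, hc, hm, ih]
      · simp [pvAltGo, pvToksFrom, hc, ih]

-- `post` is empty or starts with '_' (a right token boundary)
def pvEndB (post : List Char) : Prop := post = [] ∨ ∃ q, post = '_' :: q

-- w is the first token (continuing tok) of l / a later token of l
def pvFirst (w tok l : List Char) : Prop := ∃ s post, l = s ++ post ∧ w = tok ++ s ∧ pvEndB post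
def pvLater (w l : List Char) : Prop := ∃ pre post, l = pre ++ '_' :: (w ++ post) ∧ pvEndB post

theorem pv_mem_toksFrom (w : List Char) (hw : '_' ∉ w) :
    ∀ (l tok : List Char), '_' ∉ tok →
      (w ∈ pvToksFrom tok l ↔ pvFirst w tok l ∨ pvLater w l) := by
  intro l
  induction l with
  | nil =>
      intro tok _htok
      simp only [pvToksFrom, List.mem_singleton]
      constructor
      · intro h; left; exact ⟨[], [], by simp, by simp [h], Or.inl rfl⟩
      · rintro (⟨s, post, hl, hweq, _⟩ | ⟨pre, post, hl, _⟩)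
        · rcases List.append_eq_nil_iff.1 hl.symm with ⟨hs, _⟩
          subst hs; simpa using hweq
        · exact absurd hl.symm (by simp)
  | cons c rest ih =>
      intro tok htok
      by_cases hc : c = '_'
      · subst hc
        simp only [pvToksFrom, if_true, List.mem_cons]
        rw [ih [] (by simp)]
        constructor
        · rintro (h | ⟨s, post, hl, hweq, hb⟩ | ⟨pre, post, hl, hb⟩)
          · left; exact ⟨[], '_' :: rest, by simp, by simp [h], Or.inr ⟨rest, rfl⟩⟩
          · right; refine ⟨[], post, ?_, hb⟩
            simp only [List.nil_append] at hweq ⊢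
            simp [hl, hweq]
          · right; exact ⟨'_' :: pre, post, by simp [hl], hb⟩
        · rintro (⟨s, post, hl, hweq, hb⟩ | ⟨pre, post, hl, hb⟩)
          · cases s with
            | nil => left; simpa using hweq
            | cons a s' =>
                exfalso
                have ha : a = '_' := by
                  have := congrArg (·.head?) hl; simpa using this.symm
                subst ha
                exact hw (by simp [hweq])
          · cases pre with
            | nil =>
                right; left
                simp only [List.nil_append, List.cons.injEq] at hl
                exact ⟨w, post, hl.2, rfl, hb⟩
            | cons a pre' =>
                simp only [List.cons_append, List.cons.injEq] at hl
                right; right; exact ⟨pre', post, hl.2, hb⟩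
      · simp only [pvToksFrom, if_neg hc]
        have htok' : '_' ∉ tok ++ [c] := by
          intro h
          rcases List.mem_append.1 h with h | h
          · exact htok h
          · exact hc (List.mem_singleton.1 h).symm
        rw [ih (tok ++ [c]) htok']
        constructor
        · rintro (⟨s, post, hl, hweq, hb⟩ | ⟨pre, post, hl, hb⟩)
          · left; exact ⟨c :: s, post, by simp [hl], by simp [hweq], hb⟩
          · right; exact ⟨c :: pre, post, by simp [hl], hb⟩
        · rintro (⟨s, post, hl, hweq, hb⟩ | ⟨pre, post, hl, hb⟩)
          · cases s with
            | nil =>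
                exfalso
                simp only [List.nil_append] at hl
                rcases hb with h | ⟨q, hq⟩
                · simp [h] at hl
                · rw [hq] at hl; exact hc (by simpa using congrArg (·.head?) hl)
            | cons a s' =>
                simp only [List.cons_append, List.cons.injEq] at hl
                left; exact ⟨s', post, hl.2, by simp [hweq, hl.1], hb⟩
          · cases pre with
            | nil =>
                exfalso
                simp only [List.nil_append, List.cons.injEq] at hl
                exact hc hl.1
            | cons a pre' =>
                simp only [List.cons_append, List.cons.injEq] at hl
                right; exact ⟨pre', post, hl.2, hb⟩

-- the four conditions A tests for one keyword w
def pvBad (w l : List Char) : Prop :=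
  (w ++ ['_'] <+: l) ∨ ('_' :: w <:+ l) ∨ (l = w) ∨ ('_' :: (w ++ ['_']) <:+: l)

theorem pv_mem_toks_iff (w : List Char) (hw : '_' ∉ w) (l : List Char) :
    w ∈ pvToksFrom [] l ↔ pvBad w l := by
  rw [pv_mem_toksFrom w hw l [] (by simp)]
  unfold pvFirst pvLater pvBad pvEndB
  constructor
  · rintro (⟨s, post, hl, hweq, hb | ⟨q, hq⟩⟩ | ⟨pre, post, hl, hb | ⟨q, hq⟩⟩)
    · right; right; left; simp only [List.nil_append] at hweq; simp [hl, hweq, hb]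
    · left
      refine ⟨q, ?_⟩
      simp only [List.nil_append] at hweq
      simp [hl, hq, hweq]
    · right; left; exact ⟨pre, by simp [hl, hb]⟩
    · right; right; right
      exact ⟨pre, q, by simp [hl, hq]⟩
  · rintro (⟨t, ht⟩ | ⟨t, ht⟩ | h | ⟨t, u, ht⟩)
    · left; exact ⟨w, '_' :: t, by simp [← ht], by simp, Or.inr ⟨t, rfl⟩⟩
    · right; exact ⟨t, [], by simp [← ht], Or.inl rfl⟩
    · left; exact ⟨w, [], by simp [h], by simp, Or.inl rfl⟩
    · right; exact ⟨t, '_' :: u, by simp [← ht], Or.inr ⟨u, rfl⟩⟩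

-- B = false iff some keyword is a token of the lowered name
theorem pvAlt_false_iff (candidate : String) :
    filter_clock_candidate_semanitcly_alt candidate = false ↔
      ∃ w ∈ pvReject, w ∈ pvToksFrom [] (PySem.Chars.lower candidate.toList) := by
  unfold filter_clock_candidate_semanitcly_alt
  rw [PySem.Str.toList_lower, pvAltGo_eq_any]
  simp only [Bool.not_eq_false', List.any_eq_true, List.contains_iff_mem]
  constructor
  · rintro ⟨t, ht, hm⟩; exact ⟨t, hm, ht⟩
  · rintro ⟨w, hm, ht⟩; exact ⟨w, ht, hm⟩

theorem pv_if_false (a x : Bool) : (if a then false else x) = (!a && x) := by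
  cases a <;> simp

theorem pvA_false_iff (candidate : String) :
    filter_clock_candidate_semanitcly candidate = false ↔
      ∃ w ∈ pvReject, pvBad w (PySem.Chars.lower candidate.toList) := by
  unfold filter_clock_candidate_semanitcly
  simp only [pv_if_false]
  rw [← Bool.not_eq_true']
  simp only [Bool.not_and, Bool.not_not, Bool.and_true, Bool.or_eq_true]
  simp only [PySem.Str.startswith_eq, PySem.Str.endswith_eq, PySem.Str.isIn_eq,
    PySem.Str.toList_lower, beq_iff_eq, String.ext_iff,
    PySem.Chars.startswith_iff, PySem.Chars.endswith_iff, PySem.Chars.isIn_iff_infix]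
  simp only [pvReject, pvBad, List.mem_cons, List.not_mem_nil, or_false,
    exists_eq_or_imp, exists_eq_left]
  simp only [String.reduceToList, List.cons_append, List.nil_append]
  tauto

-- ===== VERDICT (by name: the statement is the Claim_ definition above) =====
theorem filter_clock_candidate_semanitcly_spec : Claim_equal_filter_clock_candidate_semanitcly := by
  intro candidate _dom
  unfold Spec_filter_clock_candidate_semanitcly
  have h : filter_clock_candidate_semanitcly candidate = false ↔
      filter_clock_candidate_semanitcly_alt candidate = false := by
    rw [pvA_false_iff, pvAlt_false_iff]
    constructor
    · rintro ⟨w, hm, hb⟩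
      refine ⟨w, hm, (pv_mem_toks_iff w ?_ _).2 hb⟩
      fin_cases hm <;> decide
    · rintro ⟨w, hm, ht⟩
      refine ⟨w, hm, (pv_mem_toks_iff w ?_ _).1 ht⟩
      fin_cases hm <;> decide
  cases hA : filter_clock_candidate_semanitcly candidate <;>
    cases hB : filter_clock_candidate_semanitcly_alt candidate <;> simp_all
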